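-- pv_equiv track=rewrite | github.com/jaycosaur/advent-of-code-2023 | day_4/a.py | calculate_card_points
-- ===== SOURCE A (Python) =====
-- def calculate_card_points(winning_numbers, your_numbers):
--     value = 0
--     for num in your_numbers:
--         if num in winning_numbers:
--             if value == 0:
--                 value = 1
--             else:
--                 value *= 2
--     return value
-- ===== SOURCE B (Python) =====
-- def calculate_card_points(winning_numbers, your_numbers):
--     matches = sum(1 for n in your_numbers if n in winning_numbers)
--     return 2 ** (matches - 1) if matches else 0
-- ===== Notes on version B (the rewrite author's own statement) =====
-- stated objective: simpler
-- what changed: Replaces A's in-loop conditional doubling accumulator with a single match count followed by a closed-form 2**(matches-1) (0 when no matches).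
import Mathlib
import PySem

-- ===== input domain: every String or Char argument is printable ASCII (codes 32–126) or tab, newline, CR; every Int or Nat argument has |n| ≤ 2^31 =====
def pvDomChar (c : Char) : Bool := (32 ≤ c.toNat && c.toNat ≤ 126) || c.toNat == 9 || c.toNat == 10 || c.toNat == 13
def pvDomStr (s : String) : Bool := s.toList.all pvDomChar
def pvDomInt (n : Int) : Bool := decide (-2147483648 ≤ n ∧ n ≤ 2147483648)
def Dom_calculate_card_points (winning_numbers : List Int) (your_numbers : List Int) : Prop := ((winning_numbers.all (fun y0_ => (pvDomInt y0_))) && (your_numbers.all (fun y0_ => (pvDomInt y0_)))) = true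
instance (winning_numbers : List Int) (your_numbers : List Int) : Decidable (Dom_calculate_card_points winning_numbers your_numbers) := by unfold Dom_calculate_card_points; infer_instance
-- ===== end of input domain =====

-- B replaces A's in-loop conditional doubling with a match count plus a closed-form power; objective: simpler.


-- ===== PORT A =====
def calculate_card_points (winning_numbers : List Int) (your_numbers : List Int) : Int :=
  your_numbers.foldl
    (fun value num =>
      if num ∈ winning_numbers then
        if value = 0 then 1 else value * 2
      else value) 0

-- ===== PORT B =====
def calculate_card_points_alt (winning_numbers : List Int) (your_numbers : List Int) : Int :=
  let m := your_numbers.countP (fun n => decide (n ∈ winning_numbers))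
  if m = 0 then 0 else 2 ^ (m - 1)

-- ===== PRECONDITION & SPEC =====
def Spec_calculate_card_points (winning_numbers : List Int) (your_numbers : List Int) (out : Int) : Prop := out = calculate_card_points_alt winning_numbers your_numbers
instance (winning_numbers : List Int) (your_numbers : List Int) (out : Int) : Decidable (Spec_calculate_card_points winning_numbers your_numbers out) := by unfold Spec_calculate_card_points; infer_instance

-- ===== CLAIM (what is proved, stated in full; the proofs are below) =====
def Claim_equal_calculate_card_points : Prop := ∀ (winning_numbers : List Int) (your_numbers : List Int), Dom_calculate_card_points winning_numbers your_numbers → Spec_calculate_card_points winning_numbers your_numbers (calculate_card_points winning_numbers your_numbers)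

-- ===== LEMMAS AND PROOFS =====

theorem pv_fold_pow (w : List Int) (ys : List Int) (k : Nat) :
    ys.foldl (fun value num => if num ∈ w then (if value = 0 then 1 else value * 2) else value)
      ((2 : Int) ^ k)
    = (2 : Int) ^ (k + ys.countP (fun n => decide (n ∈ w))) := by
  induction ys generalizing k with
  | nil => simp
  | cons x t ih =>
    by_cases hx : x ∈ w
    · have h2 : ((2 : Int) ^ k ≠ 0) := by positivity
      simp only [List.foldl_cons, List.countP_cons, hx, if_pos, decide_true, h2, if_false]
      have h3 : (2 : Int) ^ k * 2 = 2 ^ (k + 1) := by ring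
      rw [h3, ih]
      congr 1
      omega
    · simp only [List.foldl_cons, List.countP_cons, hx, decide_false, if_false]
      rw [ih]
      simp

theorem pv_fold_zero (w : List Int) (ys : List Int) :
    ys.foldl (fun value num => if num ∈ w then (if value = 0 then 1 else value * 2) else value) 0
    = (let m := ys.countP (fun n => decide (n ∈ w)); if m = 0 then (0 : Int) else 2 ^ (m - 1)) := by
  induction ys with
  | nil => simp
  | cons x t ih =>
    by_cases hx : x ∈ w
    · simp only [List.foldl_cons, List.countP_cons, hx, decide_true, if_pos]
      have h1 := pv_fold_pow w t 0
      norm_num at h1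
      rw [h1]
      simp
    · simp only [List.foldl_cons, List.countP_cons, hx, decide_false, if_false]
      simpa using ih

-- ===== VERDICT (by name: the statement is the Claim_ definition above) =====
theorem calculate_card_points_spec : Claim_equal_calculate_card_points := by
  intro w ys _
  unfold Spec_calculate_card_points calculate_card_points calculate_card_points_alt
  exact pv_fold_zero w ys
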